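-- pv_equiv track=rewrite | github.com/sampsyo/bril | examples/loop.py | loopsy
-- ===== SOURCE A (Python) =====
-- def loopsy(source,sink,predecessors):
--     worklist = [source]
--     loop = set()
--     while len(worklist)>0:
--         current = worklist.pop()
--         pr = predecessors[current]
--         for p in pr:
--             if not(p in loop or p==sink):
--                 loop.add(p)
--                 worklist.append(p)
--     loop.add(sink)
--     loop.add(source)
--     return loop
-- ===== SOURCE B (Python) =====
-- def loopsy(source, sink, predecessors):
--     def expand(found, current):
--         fresh = [p for p in predecessors[current] if p != sink and p not in found]
--         fresh = list(dict.fromkeys(fresh))  # drop duplicates, keep first occurrences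
--         found = found + fresh
--         for p in reversed(fresh):
--             found = expand(found, p)
--         return found
--
--     result = expand([], source)
--     for extra in (sink, source):
--         if extra not in result:
--             result.append(extra)
--     return set(result)
-- ===== Notes on version B (the rewrite author's own statement) =====
-- stated objective: alternative
-- what changed: Replaces the imperative worklist/while loop mutating a set with a purely functional recursive expand(found, current) that threads an ordered duplicate-free list: it filters the predecessors by a comprehension, dedupes them with dict.fromkeys, appends the batch, and recurses on it in reverse; sink and source are appended at the end if missing.
import Mathlib
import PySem

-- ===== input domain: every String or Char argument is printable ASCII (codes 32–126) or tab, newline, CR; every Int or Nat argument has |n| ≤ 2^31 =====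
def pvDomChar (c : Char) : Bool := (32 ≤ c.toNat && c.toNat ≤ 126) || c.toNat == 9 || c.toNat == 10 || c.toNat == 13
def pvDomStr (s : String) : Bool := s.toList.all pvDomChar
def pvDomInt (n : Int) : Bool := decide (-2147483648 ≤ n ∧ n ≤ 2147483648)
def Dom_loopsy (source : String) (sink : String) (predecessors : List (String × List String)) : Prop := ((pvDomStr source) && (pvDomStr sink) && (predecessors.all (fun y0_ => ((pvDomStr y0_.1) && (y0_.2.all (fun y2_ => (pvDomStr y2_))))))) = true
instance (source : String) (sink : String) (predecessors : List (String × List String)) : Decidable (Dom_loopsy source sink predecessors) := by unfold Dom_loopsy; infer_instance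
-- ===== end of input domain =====

-- B replaces A's imperative worklist/while loop mutating a set by a purely functional recursive
-- expand(found, current) threading an ordered duplicate-free list: filter the predecessors,
-- dedupe (dict.fromkeys), append the batch, recurse on it in reverse (objective: alternative).

-- ===== PORT A =====
-- one step of A's inner 'for p in pr' loop over the state (loop, worklist);
-- the worklist is kept reversed (head = top of Python's stack: append = cons, pop = head)
def loopsyStep (sink : String) (st : PySem.Set String × List String) (p : String) : PySem.Set String × List String :=
  if PySem.Set.contains st.1 p || p == sink then st else (PySem.Set.add st.1 p, p :: st.2)

-- A's 'while len(worklist)>0' loop; the Nat argument is a fuel guard that only makes the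
-- recursion total — loopsy passes provably sufficient fuel, the 0-with-work case is never reached
def loopsyRun (predecessors : List (String × List String)) (sink : String) : Nat → List String → PySem.Set String → PySem.Set String
  | _, [], loop => loop
  | 0, _, loop => loop
  | fuel+1, current :: rest, loop =>
    let pr := ((PySem.Dict.mk predecessors).get? current).getD []  -- predecessors[current]; a missing key (KeyError) is excluded by Pre_
    let st := pr.foldl (loopsyStep sink) (loop, rest)
    loopsyRun predecessors sink fuel st.2 st.1

def loopsy (source : String) (sink : String) (predecessors : List (String × List String)) : List String :=
  let loop := loopsyRun predecessors sink ((predecessors.map (fun kv => kv.2.length)).sum + 1) [source] PySem.Set.empty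
  PySem.Set.add (PySem.Set.add loop sink) source

-- ===== PORT B =====
-- B's recursive expand(found, current); the Nat argument is a fuel guard for totality only —
-- loopsy_alt passes provably sufficient fuel, the 0 case is never reached
def loopsyExpand (predecessors : List (String × List String)) (sink : String) : Nat → List String → String → List String
  | 0, found, _ => found
  | fuel+1, found, current =>
    -- fresh = list(dict.fromkeys([p for p in predecessors[current] if p != sink and p not in found]))
    let fresh := PySem.List.dedup
      ((((PySem.Dict.mk predecessors).get? current).getD []).filter
        (fun p => !(p == sink) && !(found.contains p)))  -- predecessors[current]; KeyError excluded by Pre_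
    let found2 := found ++ fresh
    fresh.reverse.foldl (fun fd p => loopsyExpand predecessors sink fuel fd p) found2

def loopsy_alt (source : String) (sink : String) (predecessors : List (String × List String)) : List String :=
  let result := loopsyExpand predecessors sink ((predecessors.map (fun kv => kv.2.length)).sum + 1) [] source
  -- for extra in (sink, source): if extra not in result: result.append(extra)
  [sink, source].foldl (fun r extra => if r.contains extra then r else r ++ [extra]) result

-- ===== PRECONDITION & SPEC =====
-- saturation of the set of nodes looked up: predecessors (other than sink) of already reached nodes
def preReach (predecessors : List (String × List String)) (sink : String) : Nat → PySem.Set String → PySem.Set String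
  | 0, s => s
  | n+1, s => preReach predecessors sink n
      (s.foldl (fun acc c => PySem.Set.update acc ((((PySem.Dict.mk predecessors).get? c).getD []).filter (fun p => !(p == sink)))) s)

-- Pre_ = exactly the inputs on which Python A returns: every node reachable from source along
-- predecessor edges (stopping at sink) has an entry in predecessors, so no dict lookup raises KeyError.
def Pre_loopsy (source : String) (sink : String) (predecessors : List (String × List String)) : Prop :=
  ∀ x ∈ preReach predecessors sink (predecessors.length + 1) (PySem.Set.ofList [source]),
    ((PySem.Dict.mk predecessors).get? x).isSome

instance (source : String) (sink : String) (predecessors : List (String × List String)) : Decidable (Pre_loopsy source sink predecessors) := by unfold Pre_loopsy; infer_instance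

def pvWitness_loopsy : String × String × (List (String × List String)) := ("a", "b", [("a", ["b"])])

def Spec_loopsy (source : String) (sink : String) (predecessors : List (String × List String)) (out : List String) : Prop := out = loopsy_alt source sink predecessors
instance (source : String) (sink : String) (predecessors : List (String × List String)) (out : List String) : Decidable (Spec_loopsy source sink predecessors out) := by unfold Spec_loopsy; infer_instance

-- ===== CLAIM (what is proved, stated in full; the proofs are below) =====
def Claim_equal_loopsy : Prop := ∀ (source : String) (sink : String) (predecessors : List (String × List String)), Dom_loopsy source sink predecessors → Pre_loopsy source sink predecessors → Spec_loopsy source sink predecessors (loopsy source sink predecessors)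


-- ===== LEMMAS AND PROOFS =====

-- proof-only helper: the fresh-batch accumulator of one visit step of A's loop
def loopsyFresh (loop : PySem.Set String) (sink : String) (fresh : List String) (p : String) : List String :=
  if PySem.Set.contains loop p || List.contains fresh p || p == sink then fresh else fresh ++ [p]

-- proof-only helper: A's while-loop reorganised as batch recursion (the bridge between the two ports)
def loopsyVisit (predecessors : List (String × List String)) (sink : String) : Nat → PySem.Set String → String → PySem.Set String
  | 0, loop, _ => loop
  | fuel+1, loop, current =>
    let pr := ((PySem.Dict.mk predecessors).get? current).getD []
    let fresh := pr.foldl (loopsyFresh loop sink) []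
    let loop1 := PySem.Set.update loop fresh
    fresh.reverse.foldl (fun l p => loopsyVisit predecessors sink fuel l p) loop1

-- all predecessor-list values of the dict, flattened
def pvVals (d : List (String × List String)) : List String := (d.map (fun kv => kv.2)).flatten

-- the termination measure: how many value positions are not yet in the loop set
def pvMu (d : List (String × List String)) (l : List String) : Nat :=
  (pvVals d).countP (fun x => !(l.contains x))

lemma pv_containsP (l : List String) (p : String) : PySem.Set.contains l p = true ↔ p ∈ l := by
  simp [PySem.Set.contains]

lemma pv_lcontains (l : List String) (a : String) : l.contains a = true ↔ a ∈ l :=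
  pv_containsP l a

lemma pv_lcontains_false (l : List String) (a : String) : l.contains a = false ↔ a ∉ l := by
  constructor
  · intro hf hm
    rw [(pv_lcontains l a).mpr hm] at hf
    cases hf
  · intro hm
    cases h : l.contains a with
    | false => rfl
    | true => exact absurd ((pv_lcontains l a).mp h) hm

lemma pv_cond_false (a b c : Bool) (h : ¬(a || b || c) = true) :
    a = false ∧ b = false ∧ c = false := by
  cases a <;> cases b <;> cases c <;> simp_all

lemma pv_contains_add (l : List String) (x p : String) :
    PySem.Set.contains (PySem.Set.add l x) p = (PySem.Set.contains l p || p == x) := by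
  rw [Bool.eq_iff_iff]
  simp only [Bool.or_eq_true, beq_iff_eq, pv_containsP]
  rw [PySem.Set.mem_add]

lemma pv_contains_update (acc : List String) (l : List String) (p : String) :
    PySem.Set.contains (PySem.Set.update l acc) p = (PySem.Set.contains l p || List.contains acc p) := by
  induction acc generalizing l with
  | nil => simp [PySem.Set.update]
  | cons x xs ih =>
    simp only [PySem.Set.update, List.foldl_cons] at *
    rw [ih (PySem.Set.add l x), pv_contains_add]
    rw [Bool.eq_iff_iff]
    simp
    tauto

lemma pv_prefix_add (l : List String) (x : String) : l <+: PySem.Set.add l x := by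
  simp only [PySem.Set.add]
  split
  · exact List.prefix_refl l
  · exact List.prefix_append l [x]

lemma pv_prefix_update (acc : List String) (l : List String) : l <+: PySem.Set.update l acc := by
  induction acc generalizing l with
  | nil => exact List.prefix_refl l
  | cons x xs ih =>
    simp only [PySem.Set.update, List.foldl_cons]
    exact (pv_prefix_add l x).trans (ih (PySem.Set.add l x))

lemma pv_update_append (acc : List String) (l : List String)
    (hnd : acc.Nodup) (hfresh : ∀ x ∈ acc, x ∉ l) : PySem.Set.update l acc = l ++ acc := by
  induction acc generalizing l with
  | nil => simp [PySem.Set.update]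
  | cons x xs ih =>
    simp only [PySem.Set.update, List.foldl_cons] at *
    have hx : PySem.Set.add l x = l ++ [x] := by
      simp only [PySem.Set.add]
      rw [if_neg]
      simp only [pv_containsP]
      exact hfresh x (by simp)
    rw [hx, ih (l ++ [x]) hnd.of_cons]
    · simp
    · intro y hy
      simp only [List.mem_append, List.mem_singleton]
      rintro (h | rfl)
      · exact hfresh y (by simp [hy]) h
      · exact (List.nodup_cons.mp hnd).1 hy

lemma pv_visit_prefix (d : List (String × List String)) (sink : String) :
    ∀ (f : Nat) (c : String) (l : PySem.Set String), l <+: loopsyVisit d sink f l c := by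
  intro f
  induction f with
  | zero => intro c l; exact List.prefix_refl l
  | succ f ih =>
    intro c l
    simp only [loopsyVisit]
    have h2 : ∀ (ps : List String) (l' : PySem.Set String),
        l' <+: ps.foldl (fun a p => loopsyVisit d sink f a p) l' := by
      intro ps
      induction ps with
      | nil => intro l'; exact List.prefix_refl l'
      | cons p ps ihp =>
        intro l'
        simp only [List.foldl_cons]
        exact (ih p l').trans (ihp _)
    exact (pv_prefix_update _ l).trans (h2 _ _)

lemma pv_fresh_mem (l : PySem.Set String) (sink : String) :
    ∀ (pr acc : List String) (x : String), x ∈ pr.foldl (loopsyFresh l sink) acc →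
      x ∈ acc ∨ (x ∈ pr ∧ x ∉ l ∧ x ≠ sink) := by
  intro pr
  induction pr with
  | nil => intro acc x hx; exact Or.inl hx
  | cons p ps ih =>
    intro acc x hx
    rw [List.foldl_cons] at hx
    by_cases hc : (PySem.Set.contains l p || List.contains acc p || p == sink) = true
    · rw [show loopsyFresh l sink acc p = acc from by rw [loopsyFresh, if_pos hc]] at hx
      rcases ih acc x hx with h | ⟨h1, h2, h3⟩
      · exact Or.inl h
      · exact Or.inr ⟨List.mem_cons_of_mem p h1, h2, h3⟩
    · rw [show loopsyFresh l sink acc p = acc ++ [p] from by rw [loopsyFresh, if_neg hc]] at hx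
      obtain ⟨hc1, hc2, hc3⟩ := pv_cond_false _ _ _ hc
      rcases ih (acc ++ [p]) x hx with h | ⟨h1, h2, h3⟩
      · rcases List.mem_append.mp h with h' | h'
        · exact Or.inl h'
        · have hxp : x = p := List.mem_singleton.mp h'
          subst hxp
          refine Or.inr ⟨List.mem_cons_self, ?_, ?_⟩
          · intro hmem
            rw [(pv_containsP l x).mpr hmem] at hc1
            cases hc1
          · intro hs
            rw [beq_iff_eq.mpr hs] at hc3
            cases hc3
      · exact Or.inr ⟨List.mem_cons_of_mem p h1, h2, h3⟩

lemma pv_fresh_nodup (l : PySem.Set String) (sink : String) :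
    ∀ (pr acc : List String), acc.Nodup → (pr.foldl (loopsyFresh l sink) acc).Nodup := by
  intro pr
  induction pr with
  | nil => intro acc h; exact h
  | cons p ps ih =>
    intro acc h
    rw [List.foldl_cons]
    by_cases hc : (PySem.Set.contains l p || List.contains acc p || p == sink) = true
    · rw [show loopsyFresh l sink acc p = acc from by rw [loopsyFresh, if_pos hc]]
      exact ih acc h
    · rw [show loopsyFresh l sink acc p = acc ++ [p] from by rw [loopsyFresh, if_neg hc]]
      apply ih
      rw [List.nodup_append]
      refine ⟨h, List.nodup_singleton p, ?_⟩
      intro y hy b hb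
      intro heq
      obtain ⟨hc1, hc2, hc3⟩ := pv_cond_false _ _ _ hc
      rw [heq, List.mem_singleton.mp hb] at hy
      rw [(pv_lcontains acc p).mpr hy] at hc2
      cases hc2

-- PySem.Set.contains agrees with List.contains
lemma pv_sc (l : List String) (p : String) : PySem.Set.contains l p = List.contains l p := by
  cases h : List.contains l p with
  | true => exact (pv_containsP _ _).mpr ((pv_lcontains _ _).mp h)
  | false =>
    cases h2 : PySem.Set.contains l p with
    | false => rfl
    | true =>
      rw [(pv_lcontains _ _).mpr ((pv_containsP _ _).mp h2)] at h
      cases h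

-- B's filter-then-dedup fresh batch is exactly A's fresh-batch fold
lemma pv_fresh_filter (l : List String) (sink : String) :
    ∀ (pr acc : List String),
      (pr.filter (fun p => !(p == sink) && !(l.contains p))).foldl PySem.Set.add acc =
        pr.foldl (loopsyFresh l sink) acc := by
  intro pr
  induction pr with
  | nil => intro acc; rfl
  | cons p ps ih =>
    intro acc
    rw [List.filter_cons, List.foldl_cons]
    by_cases hkeep : (!(p == sink) && !(l.contains p)) = true
    · rw [if_pos hkeep, List.foldl_cons]
      have hs : (p == sink) = false := by
        cases h : (p == sink) with
        | false => rfl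
        | true => rw [h] at hkeep; cases hkeep
      have hl : List.contains l p = false := by
        cases h : List.contains l p with
        | false => rfl
        | true => rw [h, hs] at hkeep; cases hkeep
      have : PySem.Set.add acc p = loopsyFresh l sink acc p := by
        simp only [PySem.Set.add, loopsyFresh, pv_sc, hs, hl, Bool.false_or, Bool.or_false]
      rw [this]
      exact ih _
    · rw [if_neg hkeep]
      have hskip : loopsyFresh l sink acc p = acc := by
        rw [loopsyFresh, if_pos]
        rw [pv_sc]
        cases h1 : (p == sink) with
        | true => simp [h1]
        | false =>
          cases h2 : List.contains l p with
          | true => simp [h2]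
          | false => exact absurd (by rw [h1, h2]; rfl) hkeep
      rw [hskip]
      exact ih acc

lemma pv_countP_lt (L : List String) (p q : String → Bool)
    (himp : ∀ a ∈ L, q a = true → p a = true) (a : String) (ha : a ∈ L)
    (hp : p a = true) (hq : q a = false) : L.countP q < L.countP p := by
  induction L with
  | nil => cases ha
  | cons b bs ih =>
    rw [List.countP_cons, List.countP_cons]
    rcases List.mem_cons.mp ha with rfl | hmem
    · have hle : bs.countP q ≤ bs.countP p :=
        List.countP_mono_left (fun x hx => himp x (by simp [hx]))
      simp [hp, hq]
      omega
    · have hstep : (if q b = true then 1 else 0) ≤ (if p b = true then 1 else 0) := by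
        split
        · rename_i hqb
          rw [if_pos (himp b (by simp) hqb)]
        · omega
      have := ih (fun x hx h => himp x (by simp [hx]) h) hmem
      omega

lemma pv_mu_mono (d : List (String × List String)) (l l' : List String)
    (h : ∀ x ∈ l, x ∈ l') : pvMu d l' ≤ pvMu d l := by
  unfold pvMu
  apply List.countP_mono_left
  intro a _ ha
  simp only [Bool.not_eq_true'] at ha ⊢
  rw [pv_lcontains_false] at ha ⊢
  exact fun hm => ha (h a hm)

lemma pv_mu_strict (d : List (String × List String)) (l : List String) (a : String)
    (hx : a ∈ pvVals d) (hnl : a ∉ l) : pvMu d (l ++ [a]) < pvMu d l := by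
  unfold pvMu
  apply pv_countP_lt (pvVals d) _ _ ?_ a hx ?_ ?_
  · intro y _ hy
    simp only [Bool.not_eq_true'] at hy ⊢
    rw [pv_lcontains_false] at hy ⊢
    exact fun hm => hy (List.mem_append_left _ hm)
  · simp only [Bool.not_eq_true']
    exact (pv_lcontains_false l a).mpr hnl
  · show (!((l ++ [a]).contains a)) = false
    rw [(show (l ++ [a]).contains a = true from (pv_lcontains (l ++ [a]) a).mpr (by simp))]
    rfl

lemma pv_mu_drop (d : List (String × List String)) :
    ∀ (F l : List String), F.Nodup → (∀ x ∈ F, x ∉ l ∧ x ∈ pvVals d) →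
      pvMu d (l ++ F) + F.length ≤ pvMu d l := by
  intro F
  induction F with
  | nil => intro l _ _; simp
  | cons x xs ih =>
    intro l hnd hfacts
    have h1 : pvMu d (l ++ [x]) < pvMu d l :=
      pv_mu_strict d l x (hfacts x (by simp)).2 (hfacts x (by simp)).1
    have h2 : pvMu d ((l ++ [x]) ++ xs) + xs.length ≤ pvMu d (l ++ [x]) := by
      apply ih (l ++ [x]) hnd.of_cons
      intro y hy
      refine ⟨?_, (hfacts y (by simp [hy])).2⟩
      simp only [List.mem_append, List.mem_singleton, not_or]
      exact ⟨(hfacts y (by simp [hy])).1, fun h => (List.nodup_cons.mp hnd).1 (h ▸ hy)⟩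
    have h3 : l ++ x :: xs = (l ++ [x]) ++ xs := by simp
    rw [h3]
    simp only [List.length_cons]
    omega

lemma pv_pr_vals (d : List (String × List String)) (c : String) :
    ∀ p ∈ ((PySem.Dict.mk d).get? c).getD [], p ∈ pvVals d := by
  intro p hp
  cases hv : (PySem.Dict.mk d).get? c with
  | none => rw [hv] at hp; cases hp
  | some v =>
    rw [hv] at hp
    simp only [Option.getD_some] at hp
    have hmem : (c, v) ∈ d := PySem.Dict.mem_items_of_get?_eq_some (PySem.Dict.mk d) hv
    exact List.mem_flatten.mpr ⟨v, List.mem_map.mpr ⟨(c, v), hmem, rfl⟩, hp⟩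

-- A's inner for-loop over (loop, worklist) equals the fresh-batch collection followed by a batch push
lemma pv_step_eq (d : List (String × List String)) (sink : String) :
    ∀ (pr acc rest : List String) (l : PySem.Set String),
      pr.foldl (loopsyStep sink) (PySem.Set.update l acc, acc.reverse ++ rest) =
        (PySem.Set.update l (pr.foldl (loopsyFresh l sink) acc),
         (pr.foldl (loopsyFresh l sink) acc).reverse ++ rest) := by
  intro pr
  induction pr with
  | nil => intro acc rest l; rfl
  | cons p ps ih =>
    intro acc rest l
    simp only [List.foldl_cons, loopsyStep, loopsyFresh]
    rw [pv_contains_update]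
    by_cases hc : (PySem.Set.contains l p || List.contains acc p || p == sink) = true
    · rw [if_pos hc, if_pos hc]
      exact ih acc rest l
    · rw [if_neg hc, if_neg hc]
      have h1 : PySem.Set.add (PySem.Set.update l acc) p = PySem.Set.update l (acc ++ [p]) := by
        simp [PySem.Set.update, List.foldl_append]
      have h2 : p :: (acc.reverse ++ rest) = (acc ++ [p]).reverse ++ rest := by simp
      rw [h1, h2]
      exact ih (acc ++ [p]) rest l

-- the fresh batch of a visit step: nodup, disjoint from the loop, inside the dict's values
lemma pv_F_facts (d : List (String × List String)) (sink : String) (l : PySem.Set String) (c : String) :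
    List.Nodup ((((PySem.Dict.mk d).get? c).getD []).foldl (loopsyFresh l sink) []) ∧
    ∀ x ∈ (((PySem.Dict.mk d).get? c).getD []).foldl (loopsyFresh l sink) [], x ∉ l ∧ x ∈ pvVals d := by
  constructor
  · exact pv_fresh_nodup l sink _ [] List.nodup_nil
  · intro x hx
    rcases pv_fresh_mem l sink _ [] x hx with h | ⟨h1, h2, _⟩
    · cases h
    · exact ⟨h2, pv_pr_vals d c x h1⟩

-- port B computes the bridge recursion: expand = visit
lemma pv_expand_eq_visit (d : List (String × List String)) (sink : String) :
    ∀ (f : Nat) (l : List String) (c : String),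
      loopsyExpand d sink f l c = loopsyVisit d sink f l c := by
  intro f
  induction f with
  | zero => intro l c; rfl
  | succ f ih =>
    intro l c
    simp only [loopsyExpand, loopsyVisit]
    set pr := ((PySem.Dict.mk d).get? c).getD [] with hpr
    set F := pr.foldl (loopsyFresh l sink) [] with hF
    have hfresh : PySem.List.dedup (pr.filter (fun p => !(p == sink) && !(l.contains p))) = F := by
      rw [PySem.List.dedup_eq_ofList, PySem.Set.ofList_eq_foldl]
      exact pv_fresh_filter l sink pr []
    obtain ⟨hnd, hmm⟩ := pv_F_facts d sink l c
    rw [← hpr, ← hF] at hnd hmm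
    have hupd : l ++ F = PySem.Set.update l F :=
      (pv_update_append F l hnd (fun y hy => (hmm y hy).1)).symm
    rw [hfresh, hupd]
    apply PySem.List.foldl_congr_mem
    intro acc x _
    exact ih acc x

-- with enough fuel (more than the measure), the fuel does not matter
lemma pv_fuel_irrel (d : List (String × List String)) (sink : String) :
    ∀ (f g : Nat) (l : PySem.Set String) (c : String),
      pvMu d l < f → pvMu d l < g → loopsyVisit d sink f l c = loopsyVisit d sink g l c := by
  intro f
  induction f with
  | zero => intro g l c hf _; omega
  | succ f ihf =>
    intro g l c hf hg
    cases g with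
    | zero => omega
    | succ g =>
      simp only [loopsyVisit]
      set pr := ((PySem.Dict.mk d).get? c).getD [] with hpr
      set F := pr.foldl (loopsyFresh l sink) [] with hFdef
      obtain ⟨hnd, hmm2⟩ := pv_F_facts d sink l c
      rw [← hpr] at hnd hmm2
      rw [← hFdef] at hnd hmm2
      by_cases hFnil : F = []
      · simp [hFnil]
      · have hupd : PySem.Set.update l F = l ++ F :=
          pv_update_append F l hnd (fun y hy => (hmm2 y hy).1)
        have hdrop : pvMu d (l ++ F) + F.length ≤ pvMu d l :=
          pv_mu_drop d F l hnd hmm2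
        have hlen : 0 < F.length := List.length_pos_of_ne_nil hFnil
        have hmu1 : pvMu d (PySem.Set.update l F) < pvMu d l := by
          rw [hupd]; omega
        have haux : ∀ (ps : List String) (l' : PySem.Set String),
            (PySem.Set.update l F) <+: l' →
            ps.foldl (fun a p => loopsyVisit d sink f a p) l' =
              ps.foldl (fun a p => loopsyVisit d sink g a p) l' := by
          intro ps
          induction ps with
          | nil => intro l' _; rfl
          | cons p ps ihp =>
            intro l' hpref
            have hmul' : pvMu d l' ≤ pvMu d (PySem.Set.update l F) :=
              pv_mu_mono d _ l' (fun x hx => hpref.subset hx)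
            simp only [List.foldl_cons]
            rw [ihf g l' p (by omega) (by omega)]
            apply ihp
            exact hpref.trans (pv_visit_prefix d sink g p l')
        exact haux F.reverse (PySem.Set.update l F) (List.prefix_refl _)

-- A's whole while-loop is the left fold of the visit bridge over the worklist
lemma pv_main (d : List (String × List String)) (sink : String) :
    ∀ (f : Nat) (wl : List String) (l : PySem.Set String),
      pvMu d l + wl.length ≤ f →
      loopsyRun d sink f wl l =
        wl.foldl (fun acc c => loopsyVisit d sink (pvMu d acc + 1) acc c) l := by
  intro f
  induction f with
  | zero =>
    intro wl l hle
    cases wl with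
    | nil => rfl
    | cons c rest => simp at hle
  | succ f ihf =>
    intro wl l hle
    cases wl with
    | nil => rfl
    | cons c rest =>
      simp only [loopsyRun, List.foldl_cons]
      have hstep := pv_step_eq d sink (((PySem.Dict.mk d).get? c).getD []) [] rest l
      have h0 : PySem.Set.update l ([] : List String) = l := rfl
      have h1 : ([] : List String).reverse ++ rest = rest := rfl
      rw [h0, h1] at hstep
      rw [hstep]
      dsimp only
      set pr := ((PySem.Dict.mk d).get? c).getD [] with hpr
      set F := pr.foldl (loopsyFresh l sink) [] with hFdef
      obtain ⟨hnd, hmm2⟩ := pv_F_facts d sink l c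
      rw [← hpr] at hnd hmm2
      rw [← hFdef] at hnd hmm2
      have hupd : PySem.Set.update l F = l ++ F :=
        pv_update_append F l hnd (fun y hy => (hmm2 y hy).1)
      have hdrop : pvMu d (l ++ F) + F.length ≤ pvMu d l :=
        pv_mu_drop d F l hnd hmm2
      have hrec : pvMu d (PySem.Set.update l F) + (F.reverse ++ rest).length ≤ f := by
        rw [hupd]
        simp only [List.length_append, List.length_reverse, List.length_cons] at *
        omega
      rw [ihf (F.reverse ++ rest) (PySem.Set.update l F) hrec, List.foldl_append]
      have hvisit : loopsyVisit d sink (pvMu d l + 1) l c =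
          F.reverse.foldl (fun a p => loopsyVisit d sink (pvMu d l) a p) (PySem.Set.update l F) := by
        simp only [loopsyVisit, hFdef, hpr]
      rw [hvisit]
      by_cases hFnil : F = []
      · rw [hFnil]; rfl
      · have hlen : 0 < F.length := List.length_pos_of_ne_nil hFnil
        have hmu1 : pvMu d (PySem.Set.update l F) < pvMu d l := by
          rw [hupd]; omega
        have haux : ∀ (ps : List String) (l' : PySem.Set String),
            (PySem.Set.update l F) <+: l' →
            ps.foldl (fun acc p => loopsyVisit d sink (pvMu d acc + 1) acc p) l' =
              ps.foldl (fun a p => loopsyVisit d sink (pvMu d l) a p) l' := by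
          intro ps
          induction ps with
          | nil => intro l' _; rfl
          | cons p ps ihp =>
            intro l' hpref
            have hmul' : pvMu d l' ≤ pvMu d (PySem.Set.update l F) :=
              pv_mu_mono d _ l' (fun y hy => hpref.subset hy)
            simp only [List.foldl_cons]
            rw [pv_fuel_irrel d sink (pvMu d l' + 1) (pvMu d l) l' p (by omega) (by omega)]
            apply ihp
            exact hpref.trans (pv_visit_prefix d sink (pvMu d l) p l')
        rw [haux F.reverse (PySem.Set.update l F) (List.prefix_refl _)]

lemma pv_mu_empty (d : List (String × List String)) :
    pvMu d [] = (d.map (fun kv => kv.2.length)).sum := by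
  unfold pvMu pvVals
  rw [List.countP_eq_length.mpr (by intro a _; rfl)]
  rw [List.length_flatten, List.map_map]
  rfl

-- B's trailing fold over [sink, source] is A's pair of Set.add calls
lemma pv_tail_eq (l : List String) (sink source : String) :
    [sink, source].foldl (fun r extra => if r.contains extra then r else r ++ [extra]) l =
      PySem.Set.add (PySem.Set.add l sink) source := by
  simp only [List.foldl_cons, List.foldl_nil, PySem.Set.add, pv_sc]

-- ===== VERDICT (by name: the statement is the Claim_ definition above) =====
theorem loopsy_spec : Claim_equal_loopsy := by
  intro source sink predecessors _ _
  show loopsy source sink predecessors = loopsy_alt source sink predecessors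
  have hE : pvMu predecessors (PySem.Set.empty : PySem.Set String)
      = (predecessors.map (fun kv => kv.2.length)).sum := pv_mu_empty predecessors
  have hXY : loopsyRun predecessors sink ((predecessors.map (fun kv => kv.2.length)).sum + 1) [source] PySem.Set.empty
      = loopsyExpand predecessors sink ((predecessors.map (fun kv => kv.2.length)).sum + 1) PySem.Set.empty source := by
    rw [pv_main predecessors sink _ [source] PySem.Set.empty
      (by simp only [List.length_cons, List.length_nil]; omega)]
    simp only [List.foldl_cons, List.foldl_nil]
    rw [pv_expand_eq_visit]
    exact pv_fuel_irrel predecessors sink (pvMu predecessors PySem.Set.empty + 1)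
      ((predecessors.map (fun kv => kv.2.length)).sum + 1) PySem.Set.empty source (by omega) (by omega)
  simp only [loopsy, loopsy_alt, hXY, pv_tail_eq]
  rfl
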